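-- pv_equiv track=rewrite | github.com/ankita-mukherjee/locksense-replication | job3_remediate.py | extract_diff
-- ===== SOURCE A (Python) =====
-- def extract_diff(text):
--     """Pull the unified diff block out of the LLM response."""
--     lines = text.splitlines()
--     in_diff = False
--     diff_lines = []
--     for line in lines:
--         if line.startswith("--- ") or line.startswith("diff "):
--             in_diff = True
--         if in_diff:
--             diff_lines.append(line)
--     return "\n".join(diff_lines) if diff_lines else text
-- ===== SOURCE B (Python) =====
-- def extract_diff(text):
--     """Pull the unified diff block out of the LLM response."""
--     result = None
--     tail = None
--     for line in reversed(text.splitlines()):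
--         tail = line if tail is None else line + "\n" + tail
--         if line.startswith("--- ") or line.startswith("diff "):
--             result = tail
--     return text if result is None else result
-- ===== Notes on version B (the rewrite author's own statement) =====
-- stated objective: alternative
-- what changed: Single reverse pass that incrementally builds the joined suffix string back-to-front and captures it whenever a marker line is seen (the last capture is the first marker's suffix), replacing A's forward flag-and-accumulate loop plus final join.
import Mathlib
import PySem

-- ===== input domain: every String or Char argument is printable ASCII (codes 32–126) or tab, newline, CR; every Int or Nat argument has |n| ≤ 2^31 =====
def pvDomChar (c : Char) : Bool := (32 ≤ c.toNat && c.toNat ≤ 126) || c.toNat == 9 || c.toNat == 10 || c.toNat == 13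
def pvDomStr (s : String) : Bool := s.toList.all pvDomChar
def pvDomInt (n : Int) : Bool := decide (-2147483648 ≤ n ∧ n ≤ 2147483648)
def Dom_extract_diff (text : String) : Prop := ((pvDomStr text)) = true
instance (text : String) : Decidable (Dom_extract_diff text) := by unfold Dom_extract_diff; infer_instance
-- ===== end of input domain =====

-- B replaces A's forward flag-and-accumulate loop (plus final join) by a single reverse
-- pass that builds the joined suffix string back-to-front and captures it at each marker
-- line; the last capture is the suffix from the first marker (alternative decomposition).

-- ===== PORT A =====
-- the marker test, verbatim from the Python
def pvIsMarker (line : String) : Bool :=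
  PySem.Str.startswith line "--- " || PySem.Str.startswith line "diff "

-- A's loop body: update the in_diff flag, then append when inside the diff
def pvStep (st : Bool × List String) (line : String) : Bool × List String :=
  let in_diff := if pvIsMarker line then true else st.1
  (in_diff, if in_diff then st.2 ++ [line] else st.2)

def extract_diff (text : String) : String :=
  let lines := PySem.Str.splitlines text
  let st := lines.foldl pvStep (false, [])
  if st.2.isEmpty then text else PySem.Str.join "\n" st.2

-- ===== PORT B =====
-- B's loop body over reversed(lines): state is (tail, result); tail grows at the front,
-- result is (re)captured whenever the current line is a marker.
def pvRevStep (st : Option String × Option String) (line : String) :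
    Option String × Option String :=
  let tail := match st.1 with
    | none => line
    | some s => line ++ "\n" ++ s
  (some tail, if pvIsMarker line then some tail else st.2)

def extract_diff_alt (text : String) : String :=
  let lines := PySem.Str.splitlines text
  let st := lines.reverse.foldl pvRevStep (none, none)
  match st.2 with
  | none => text
  | some r => r

-- ===== PRECONDITION & SPEC =====
def Spec_extract_diff (text : String) (out : String) : Prop := out = extract_diff_alt text
instance (text : String) (out : String) : Decidable (Spec_extract_diff text out) := by unfold Spec_extract_diff; infer_instance

-- ===== CLAIM (what is proved, stated in full; the proofs are below) =====
def Claim_equal_extract_diff : Prop := ∀ (text : String), Dom_extract_diff text → Spec_extract_diff text (extract_diff text)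

-- ===== LEMMAS AND PROOFS =====

-- join "\n" on a singleton and on a cons with nonempty tail
theorem pvJoin_singleton (l : String) : PySem.Str.join "\n" [l] = l := by
  have h : (PySem.Str.join "\n" [l]).toList = l.toList := by
    simp [PySem.Str.toList_join, PySem.Chars.join, List.intercalate]
  exact String.toList_inj.mp h

theorem pvJoin_cons (l a : String) (ls : List String) :
    PySem.Str.join "\n" (l :: a :: ls) = l ++ "\n" ++ PySem.Str.join "\n" (a :: ls) := by
  have h : (PySem.Str.join "\n" (l :: a :: ls)).toList
      = (l ++ "\n" ++ PySem.Str.join "\n" (a :: ls)).toList := by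
    simp [PySem.Str.toList_join, PySem.Chars.join, List.intercalate]
  exact String.toList_inj.mp h

-- projections of B's step, so the fold lemmas never unfold pvRevStep under the foldr
theorem pvRevStep_fst (st : Option String × Option String) (line : String) :
    (pvRevStep st line).1
      = some (match st.1 with | none => line | some s => line ++ "\n" ++ s) := rfl

theorem pvRevStep_snd (st : Option String × Option String) (line : String) :
    (pvRevStep st line).2
      = (if pvIsMarker line then (pvRevStep st line).1 else st.2) := by
  unfold pvRevStep
  by_cases h : pvIsMarker line <;> simp [h]

-- characterisation of A's fold: once the flag is set, everything is appended
theorem pvFold_true (ls : List String) : ∀ acc,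
    ls.foldl pvStep (true, acc) = (true, acc ++ ls) := by
  induction ls with
  | nil => simp
  | cons l ls ih =>
    intro acc
    simp [List.foldl_cons, pvStep, ih]

-- A's accumulated lines are the tail from the first marker index
theorem pvFold_snd (ls : List String) :
    (ls.foldl pvStep (false, [])).2 =
      (match ls.findIdx? pvIsMarker with
       | none => []
       | some i => ls.drop i) := by
  induction ls with
  | nil => simp
  | cons l ls ih =>
    by_cases h : pvIsMarker l = true
    · simp [List.foldl_cons, pvStep, h, pvFold_true, List.findIdx?_cons]
    · simp only [List.foldl_cons, pvStep, h, if_false, List.findIdx?_cons, Bool.false_eq_true]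
      rw [ih]
      cases hf : ls.findIdx? pvIsMarker with
      | none => simp
      | some i => simp [List.drop_succ_cons]

-- B's reverse fold, read as a foldr: the tail component is the join of all lines
theorem pvRevFold_fst (ls : List String) :
    (ls.foldr (fun l st => pvRevStep st l) (none, none)).1 =
      (if ls.isEmpty then none else some (PySem.Str.join "\n" ls)) := by
  induction ls with
  | nil => rfl
  | cons l ls ih =>
    rw [List.foldr_cons, pvRevStep_fst, ih]
    cases ls with
    | nil => simp [pvJoin_singleton]
    | cons a ls' => simp [pvJoin_cons]

-- B's result component is the joined tail from the first marker index
theorem pvRevFold_snd (ls : List String) :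
    (ls.foldr (fun l st => pvRevStep st l) (none, none)).2 =
      (ls.findIdx? pvIsMarker).map (fun i => PySem.Str.join "\n" (ls.drop i)) := by
  induction ls with
  | nil => rfl
  | cons l ls ih =>
    rw [List.foldr_cons, pvRevStep_snd, List.findIdx?_cons]
    by_cases h : pvIsMarker l = true
    · rw [pvRevStep_fst, pvRevFold_fst]
      cases ls with
      | nil => simp [h, pvJoin_singleton]
      | cons a ls' => simp [h, pvJoin_cons]
    · simp only [h, if_false, Bool.false_eq_true, ih]
      cases hf : ls.findIdx? pvIsMarker with
      | none => simp
      | some i => simp [List.drop_succ_cons]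

-- ===== VERDICT =====
theorem extract_diff_spec : Claim_equal_extract_diff := by
  intro text _
  unfold Spec_extract_diff extract_diff extract_diff_alt
  dsimp only
  rw [List.foldl_reverse, pvFold_snd (PySem.Str.splitlines text),
    pvRevFold_snd (PySem.Str.splitlines text)]
  cases hf : (PySem.Str.splitlines text).findIdx? pvIsMarker with
  | none => simp
  | some i =>
    have hi : i < (PySem.Str.splitlines text).length :=
      List.findIdx?_eq_some_iff_findIdx_eq.mp hf |>.1
    simp [List.isEmpty_iff, List.drop_eq_nil_iff, Nat.not_le_of_lt hi]
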